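-- pv_equiv track=rewrite | github.com/Inveterate-Enthusiast/LeetCode | Python/120. Triangle.py | minimumTotal1
-- ===== SOURCE A (Python) =====
-- def minimumTotal1(triangle: list[list[int]]) -> int:
--     if len(triangle) == 1:
--         return triangle[0][0]
--     OurMinResult = float("inf")
--     for indexFloor in range(1, len(triangle)):
--         for index in range((len(triangle[indexFloor]))):
--             triangle[indexFloor][index] = triangle[indexFloor][index] + min(
--                 (triangle[indexFloor-1][index]) if index < len(triangle[indexFloor-1]) else float("inf"),
--                 (triangle[indexFloor-1][index-1]) if index-1 >= 0 else float("inf"))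
--             if indexFloor == (len(triangle) - 1):
--                 OurMinResult = min(OurMinResult, triangle[indexFloor][index])
--     return OurMinResult
-- ===== SOURCE B (Python) =====
-- def minimumTotal1(triangle: list[list[int]]) -> int:
--     # Bottom-up DP (no mutation of the argument, unlike A which rewrites it in place).
--     if len(triangle) == 1:
--         return triangle[0][0]
--     INF = float("inf")
--     dp = list(triangle[-1])
--     for i in range(len(triangle) - 2, -1, -1):
--         dp = [v + min(dp[j] if j < len(dp) else INF,
--                       dp[j + 1] if j + 1 < len(dp) else INF)
--               for j, v in enumerate(triangle[i])]
--     return min(dp)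
-- ===== Notes on version B (the rewrite author's own statement) =====
-- stated objective: alternative
-- what changed: Replaces A's top-down DP that mutates the triangle row by row (inf-padded parent lookups plus a running min over the last row) with a bottom-up DP over a fresh one-row list folded from the last row to the top, returning min(dp) at the apex; B does not mutate its argument.
-- outside the precondition, e.g. on minimumTotal1([]): A returns inf, B raises IndexError; on minimumTotal1([[1], []]): A returns inf, B returns inf
import Mathlib
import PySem

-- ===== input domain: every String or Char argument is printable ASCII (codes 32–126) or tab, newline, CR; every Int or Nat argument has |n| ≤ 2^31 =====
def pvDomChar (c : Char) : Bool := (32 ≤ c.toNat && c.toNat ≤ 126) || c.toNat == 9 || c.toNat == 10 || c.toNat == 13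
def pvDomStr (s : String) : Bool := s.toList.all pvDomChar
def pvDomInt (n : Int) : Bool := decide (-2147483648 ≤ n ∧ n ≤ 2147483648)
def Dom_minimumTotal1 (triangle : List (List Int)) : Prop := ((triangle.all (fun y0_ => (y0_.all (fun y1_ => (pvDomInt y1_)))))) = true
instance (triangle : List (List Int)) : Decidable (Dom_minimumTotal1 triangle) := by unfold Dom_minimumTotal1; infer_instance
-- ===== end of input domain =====

-- B re-implements A's top-down in-place DP as a bottom-up DP over a fresh list (B does not mutate
-- the argument, A rewrites `triangle` in place; the equivalence proved here is about the return
-- value only).  Python's float("inf") is modelled as ⊤ in `WithTop Int`.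

-- ===== PORT A =====
-- `min(prev[idx] if idx < len(prev) else inf, prev[idx-1] if idx-1 >= 0 else inf)`
def pvPm (prev : List (WithTop Int)) (idx : Nat) : WithTop Int :=
  min (if idx < prev.length then prev.getD idx ⊤ else ⊤)
      (if 1 ≤ idx then prev.getD (idx - 1) ⊤ else ⊤)

-- one iteration of A's inner loop: mutate triangle[iF][idx], update OurMinResult on the last floor
def pvInner (n iF : Nat) (st : List (List (WithTop Int)) × WithTop Int) (idx : Nat) :
    List (List (WithTop Int)) × WithTop Int :=
  ((st.1).set iF (((st.1).getD iF []).set idx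
      (((st.1).getD iF []).getD idx ⊤ + pvPm ((st.1).getD (iF - 1) []) idx)),
   if iF = n - 1
   then min st.2 (((st.1).getD iF []).getD idx ⊤ + pvPm ((st.1).getD (iF - 1) []) idx)
   else st.2)

-- A's inner loop: `for index in range(len(triangle[indexFloor]))`
def pvFloor (n : Nat) (st : List (List (WithTop Int)) × WithTop Int) (iF : Nat) :
    List (List (WithTop Int)) × WithTop Int :=
  (List.range ((st.1).getD iF []).length).foldl (pvInner n iF) st

def minimumTotal1 (triangle : List (List Int)) : Int :=
  if triangle.length = 1 then (triangle.getD 0 []).getD 0 0   -- triangle[0][0]; in range under Pre_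
  else
    WithTop.untopD 0   -- OurMinResult; ⊤ (Python: the float inf, not an int) only outside Pre_
      ((List.range (triangle.length - 1)).foldl
        (fun st i0 => pvFloor triangle.length st (i0 + 1))
        (triangle.map (fun r => r.map (fun (v : Int) => (v : WithTop Int))), (⊤ : WithTop Int))).2

-- ===== PORT B =====
-- `min(dp[j] if j < len(dp) else INF, dp[j+1] if j+1 < len(dp) else INF)`
def pvCm (dp : List (WithTop Int)) (j : Nat) : WithTop Int :=
  min (if j < dp.length then dp.getD j ⊤ else ⊤)
      (if j + 1 < dp.length then dp.getD (j + 1) ⊤ else ⊤)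

-- the list comprehension of Source B (one bottom-up step)
def pvUpRow (row : List Int) (dp : List (WithTop Int)) : List (WithTop Int) :=
  row.mapIdx (fun j (v : Int) => (v : WithTop Int) + pvCm dp j)

def minimumTotal1_alt (triangle : List (List Int)) : Int :=
  if triangle.length = 1 then (triangle.getD 0 []).getD 0 0   -- triangle[0][0]; in range under Pre_
  else
    WithTop.untopD 0
      (match ((List.range (triangle.length - 1)).reverse).foldl
          (fun dp i => pvUpRow (triangle.getD i []) dp)
          ((triangle.getD (triangle.length - 1) []).map (fun (v : Int) => (v : WithTop Int))) with
        | [] => (⊤ : WithTop Int)   -- min(dp); Python raises ValueError here (outside Pre_)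
        | x :: xs => xs.foldl min x)

-- ===== PRECONDITION & SPEC =====
-- Pre_ is exactly where Python A returns an int: A raises IndexError when some row is more than
-- one longer than its predecessor (unless that row has length 1) or when the only row is empty,
-- and it returns the float inf (not an int) when the triangle or any of its rows is empty.
def Pre_minimumTotal1 (triangle : List (List Int)) : Prop :=
  triangle ≠ [] ∧ (∀ r ∈ triangle, r ≠ []) ∧
  List.IsChain (fun a b : List Int => b.length ≤ a.length + 1 ∨ b.length = 1) triangle
instance (triangle : List (List Int)) : Decidable (Pre_minimumTotal1 triangle) := by
  unfold Pre_minimumTotal1; infer_instance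

def pvWitness_minimumTotal1 : List (List Int) := [[2], [3, 4], [6, 5, 7]]

def Spec_minimumTotal1 (triangle : List (List Int)) (out : Int) : Prop := out = minimumTotal1_alt triangle
instance (triangle : List (List Int)) (out : Int) : Decidable (Spec_minimumTotal1 triangle out) := by
  unfold Spec_minimumTotal1; infer_instance

-- ===== CLAIM (what is proved, stated in full; the proofs are below) =====
def Claim_equal_minimumTotal1 : Prop := ∀ (triangle : List (List Int)), Dom_minimumTotal1 triangle → Pre_minimumTotal1 triangle → Spec_minimumTotal1 triangle (minimumTotal1 triangle)

-- ===== LEMMAS AND PROOFS =====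

-- `coe` of a whole row
def pvCoe (r : List Int) : List (WithTop Int) := r.map (fun (v : Int) => (v : WithTop Int))

-- functional form of A's update of one row (offset recursion mirrors the in-place loop)
def pvUpd (prev : List (WithTop Int)) : Nat → List (WithTop Int) → List (WithTop Int)
  | _, [] => []
  | k, v :: vs => (v + pvPm prev k) :: pvUpd prev (k + 1) vs

-- A's forward DP over the remaining rows
def pvFwd (acc : List (WithTop Int)) (rs : List (List Int)) : List (WithTop Int) :=
  rs.foldl (fun acc r => pvUpd acc 0 (pvCoe r)) acc

-- B's backward DP
def pvBwd : List (List Int) → List (WithTop Int)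
  | [] => []
  | [r] => pvCoe r
  | r :: s :: rs => pvUpRow r (pvBwd (s :: rs))

-- minimum of a list of extended ints
def pvLM (l : List (WithTop Int)) : WithTop Int := l.foldr min ⊤

-- minimum of f over indices 0..n-1
def pvRmin : Nat → (Nat → WithTop Int) → WithTop Int
  | 0, _ => ⊤
  | n + 1, f => min (f 0) (pvRmin n (fun i => f (i + 1)))

theorem pvRmin_congr {n : Nat} {f g : Nat → WithTop Int} (h : ∀ i, i < n → f i = g i) :
    pvRmin n f = pvRmin n g := by
  induction n generalizing f g with
  | zero => rfl
  | succ n ih =>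
    simp only [pvRmin]
    rw [h 0 (by omega), ih (fun i hi => h (i + 1) (by omega))]

theorem pvRmin_min (n : Nat) (f g : Nat → WithTop Int) :
    pvRmin n (fun i => min (f i) (g i)) = min (pvRmin n f) (pvRmin n g) := by
  induction n generalizing f g with
  | zero => simp [pvRmin]
  | succ n ih =>
    simp only [pvRmin, ih]
    rw [min_min_min_comm]

theorem pvRmin_top {n : Nat} {f : Nat → WithTop Int} (h : ∀ i, i < n → f i = ⊤) :
    pvRmin n f = ⊤ := by
  induction n generalizing f with
  | zero => rfl
  | succ n ih =>
    simp only [pvRmin]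
    rw [h 0 (by omega), ih (fun i hi => h (i + 1) (by omega))]
    simp

theorem pvRmin_add (n m : Nat) (f : Nat → WithTop Int) :
    pvRmin (n + m) f = min (pvRmin n f) (pvRmin m (fun i => f (n + i))) := by
  induction n generalizing f with
  | zero => simp [pvRmin]
  | succ n ih =>
    have h1 : n + 1 + m = (n + m) + 1 := by omega
    rw [h1]
    simp only [pvRmin, ih, min_assoc]
    congr 2
    apply pvRmin_congr
    intro i _
    congr 1
    omega

theorem pvRmin_pad {n : Nat} (m : Nat) {f : Nat → WithTop Int}
    (h : ∀ i, n ≤ i → f i = ⊤) (hnm : n ≤ m) : pvRmin m f = pvRmin n f := by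
  have h2 : m = n + (m - n) := by omega
  rw [h2, pvRmin_add]
  rw [pvRmin_top (f := fun i => f (n + i)) (fun i _ => h (n + i) (by omega))]
  simp

theorem pvLM_mapIdx {α : Type} (d : α) (l : List α) (f : Nat → α → WithTop Int) :
    pvLM (l.mapIdx f) = pvRmin l.length (fun j => f j (l.getD j d)) := by
  induction l generalizing f with
  | nil => rfl
  | cons a l ih =>
    simp only [List.mapIdx_cons, pvLM, List.foldr_cons, List.length_cons, pvRmin]
    rw [show (l.mapIdx fun i => f (i + 1)).foldr min ⊤ = pvLM (l.mapIdx fun i => f (i + 1)) from rfl, ih]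
    rfl

theorem pvAdd_min (a b c : WithTop Int) : a + min b c = min (a + b) (a + c) :=
  (min_add_add_left a b c).symm

theorem pvFoldl_min (l : List (WithTop Int)) (a : WithTop Int) :
    l.foldl min a = min a (pvLM l) := by
  induction l generalizing a with
  | nil => simp [pvLM]
  | cons x xs ih =>
    simp only [List.foldl_cons, ih, pvLM, List.foldr_cons]
    rw [show xs.foldr min ⊤ = pvLM xs from rfl, min_assoc]

theorem pvIfGetD (l : List (WithTop Int)) (j : Nat) :
    (if j < l.length then l.getD j ⊤ else ⊤) = l.getD j ⊤ := by
  split_ifs with h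
  · rfl
  · rw [List.getD_eq_default _ _ (by omega)]

theorem pvPm_eq (sa : List (WithTop Int)) (j : Nat) :
    pvPm sa j = min (sa.getD j ⊤) (if j = 0 then ⊤ else sa.getD (j - 1) ⊤) := by
  unfold pvPm
  rw [pvIfGetD]
  congr 1
  rcases Nat.eq_zero_or_pos j with h | h
  · rw [if_neg (by omega), if_pos h]
  · rw [if_pos (by omega), if_neg (by omega)]

theorem pvCm_eq (d : List (WithTop Int)) (k : Nat) :
    pvCm d k = min (d.getD k ⊤) (d.getD (k + 1) ⊤) := by
  unfold pvCm
  rw [pvIfGetD, pvIfGetD]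

theorem pvTake_succ {α : Type} (l : List α) (n : Nat) (h : n < l.length) :
    l.take (n + 1) = l.take n ++ [l[n]] := by
  rw [List.take_add_one, List.getElem?_eq_getElem h]
  rfl

-- the single combinatorial step: a "parents" pass against sa equals a "children" pass against d
theorem pvKey (sa d : List (WithTop Int)) :
    pvRmin d.length (fun j => d.getD j ⊤ + pvPm sa j)
      = pvRmin sa.length (fun k => sa.getD k ⊤ + pvCm d k) := by
  set N := d.length
  set K := sa.length
  have hd : ∀ j, N ≤ j → d.getD j ⊤ = ⊤ := fun j hj => List.getD_eq_default _ ⊤ hj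
  have he : ∀ k, K ≤ k → sa.getD k ⊤ = ⊤ := fun k hk => List.getD_eq_default _ ⊤ hk
  have lhs1 : pvRmin N (fun j => d.getD j ⊤ + pvPm sa j)
      = min (pvRmin N (fun j => d.getD j ⊤ + sa.getD j ⊤))
            (pvRmin N (fun j => if j = 0 then ⊤ else d.getD j ⊤ + sa.getD (j - 1) ⊤)) := by
    rw [← pvRmin_min]
    apply pvRmin_congr
    intro j _
    rw [pvPm_eq, pvAdd_min]
    congr 1
    split_ifs <;> simp
  have rhs1 : pvRmin K (fun k => sa.getD k ⊤ + pvCm d k)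
      = min (pvRmin K (fun k => sa.getD k ⊤ + d.getD k ⊤))
            (pvRmin K (fun k => sa.getD k ⊤ + d.getD (k + 1) ⊤)) := by
    rw [← pvRmin_min]
    apply pvRmin_congr
    intro k _
    rw [pvCm_eq, pvAdd_min]
  rw [lhs1, rhs1]
  congr 1
  · have h1 : pvRmin N (fun j => d.getD j ⊤ + sa.getD j ⊤)
        = pvRmin (N + K) (fun j => d.getD j ⊤ + sa.getD j ⊤) :=
      (pvRmin_pad (N + K) (fun i hi => by rw [hd i hi]; simp) (by omega)).symm
    have h2 : pvRmin K (fun k => sa.getD k ⊤ + d.getD k ⊤)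
        = pvRmin (N + K) (fun k => sa.getD k ⊤ + d.getD k ⊤) :=
      (pvRmin_pad (N + K) (fun i hi => by rw [he i hi]; simp) (by omega)).symm
    rw [h1, h2]
    exact pvRmin_congr (fun i _ => add_comm _ _)
  · cases hN : N with
    | zero =>
      rw [pvRmin_top (fun i hi => by omega)]
      rw [pvRmin_top (fun k hk => by rw [hd (k + 1) (by omega)]; simp)]
    | succ n =>
      rw [show pvRmin (n + 1) (fun j => if j = 0 then ⊤ else d.getD j ⊤ + sa.getD (j - 1) ⊤)
            = min ⊤ (pvRmin n (fun i => d.getD (i + 1) ⊤ + sa.getD i ⊤)) from by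
          simp only [pvRmin]
          congr 1]
      rw [min_top_left]
      have h1 : pvRmin n (fun i => d.getD (i + 1) ⊤ + sa.getD i ⊤)
          = pvRmin (n + K) (fun i => d.getD (i + 1) ⊤ + sa.getD i ⊤) :=
        (pvRmin_pad (n + K) (fun i hi => by rw [hd (i + 1) (by omega)]; simp) (by omega)).symm
      have h2 : pvRmin K (fun k => sa.getD k ⊤ + d.getD (k + 1) ⊤)
          = pvRmin (n + K) (fun k => sa.getD k ⊤ + d.getD (k + 1) ⊤) :=
        (pvRmin_pad (n + K) (fun i hi => by rw [he i hi]; simp) (by omega)).symm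
      rw [h1, h2]
      exact pvRmin_congr (fun i _ => add_comm _ _)

theorem pvUpd_length (prev : List (WithTop Int)) : ∀ (k : Nat) (cur : List (WithTop Int)),
    (pvUpd prev k cur).length = cur.length := by
  intro k cur
  induction cur generalizing k with
  | nil => rfl
  | cons v vs ih => simp [pvUpd, ih]

theorem pvUpd_getD (prev : List (WithTop Int)) : ∀ (cur : List (WithTop Int)) (k j : Nat),
    (pvUpd prev k cur).getD j ⊤
      = if j < cur.length then cur.getD j ⊤ + pvPm prev (k + j) else ⊤ := by
  intro cur
  induction cur with
  | nil => intro k j; simp [pvUpd]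
  | cons v vs ih =>
    intro k j
    cases j with
    | zero => simp [pvUpd]
    | succ j =>
      simp only [pvUpd, List.getD_cons_succ, ih, List.length_cons]
      split_ifs with h1 h2 h3 <;> try (first | rfl | omega)
      congr 2
      omega

theorem pvLM_pvUpd (prev : List (WithTop Int)) : ∀ (cur : List (WithTop Int)) (k : Nat),
    pvLM (pvUpd prev k cur) = pvRmin cur.length (fun j => cur.getD j ⊤ + pvPm prev (k + j)) := by
  intro cur
  induction cur with
  | nil => intro k; rfl
  | cons v vs ih =>
    intro k
    simp only [pvUpd, pvLM, List.foldr_cons, List.length_cons, pvRmin]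
    rw [show (pvUpd prev (k + 1) vs).foldr min ⊤ = pvLM (pvUpd prev (k + 1) vs) from rfl, ih]
    congr 1
    apply pvRmin_congr
    intro i _
    simp only [List.getD_cons_succ]
    congr 2
    omega

theorem pvCoe_length (r : List Int) : (pvCoe r).length = r.length := by simp [pvCoe]

theorem pvCoe_getD (r : List Int) (k : Nat) (h : k < r.length) :
    (pvCoe r).getD k ⊤ = ((r.getD k 0 : Int) : WithTop Int) := by
  rw [List.getD_eq_getElem _ _ (by simp [pvCoe]; omega), List.getD_eq_getElem _ _ h]
  simp [pvCoe]

-- forward DP and backward DP have the same minimum (relative to an incoming accumulator row)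
theorem pvMain : ∀ (rs : List (List Int)) (acc : List (WithTop Int)), rs ≠ [] →
    pvLM (pvFwd acc rs)
      = pvRmin (pvBwd rs).length (fun j => (pvBwd rs).getD j ⊤ + pvPm acc j) := by
  intro rs
  induction rs with
  | nil => intro acc h; exact absurd rfl h
  | cons r rs ih =>
    intro acc _
    cases rs with
    | nil =>
      simp only [pvFwd, List.foldl_cons, List.foldl_nil, pvBwd]
      rw [pvLM_pvUpd, pvCoe_length]
      apply pvRmin_congr
      intro j hj
      rw [Nat.zero_add]
    | cons s rs' =>
      have hne : s :: rs' ≠ [] := by simp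
      have step : pvFwd acc (r :: s :: rs') = pvFwd (pvUpd acc 0 (pvCoe r)) (s :: rs') := rfl
      rw [step, ih _ hne]
      set d := pvBwd (s :: rs') with hdd
      set sa := pvUpd acc 0 (pvCoe r) with hsa
      have hlen : sa.length = r.length := by rw [hsa, pvUpd_length, pvCoe_length]
      rw [pvKey sa d, hlen]
      have hup : pvBwd (r :: s :: rs') = pvUpRow r d := by rw [pvBwd]
      rw [hup]
      have hlen2 : (pvUpRow r d).length = r.length := by simp [pvUpRow]
      rw [hlen2]
      apply pvRmin_congr
      intro k hk
      have h1 : sa.getD k ⊤ = ((r.getD k 0 : Int) : WithTop Int) + pvPm acc k := by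
        rw [hsa, pvUpd_getD]
        rw [if_pos (by rw [pvCoe_length]; omega)]
        rw [pvCoe_getD r k hk]
        norm_num
      have h2 : (pvUpRow r d).getD k ⊤ = ((r.getD k 0 : Int) : WithTop Int) + pvCm d k := by
        rw [List.getD_eq_getElem _ _ (by rw [hlen2]; omega)]
        simp only [pvUpRow, List.getElem_mapIdx]
        rw [List.getD_eq_getElem _ _ (by omega)]
      rw [h1, h2]
      exact add_right_comm _ _ _

-- pvLM of B's comprehension row
theorem pvLM_pvUpRow (r : List Int) (d : List (WithTop Int)) :
    pvLM (pvUpRow r d) = pvRmin r.length (fun k => ((r.getD k 0 : Int) : WithTop Int) + pvCm d k) := by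
  unfold pvUpRow
  rw [pvLM_mapIdx 0]

-- ========== A-side extraction ==========

theorem pvGetD_set_self {α : Type} (l : List α) (d : α) (i : Nat) (x : α) (h : i < l.length) :
    (l.set i x).getD i d = x := by
  simp [List.getD_eq_getElem?_getD, h]

theorem pvGetD_set_ne {α : Type} (l : List α) (d : α) (i j : Nat) (x : α) (h : i ≠ j) :
    (l.set i x).getD j d = l.getD j d := by
  simp [List.getD_eq_getElem?_getD, List.getElem?_set_ne h]

theorem pvInner_gen (n iF : Nat) (hiF : 1 ≤ iF) :
    ∀ (rest done : List (WithTop Int)) (tri : List (List (WithTop Int))) (m : WithTop Int),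
    iF < tri.length →
    tri.getD iF [] = done ++ rest →
    (List.range' done.length rest.length).foldl (pvInner n iF) (tri, m)
      = (tri.set iF (done ++ pvUpd (tri.getD (iF - 1) []) done.length rest),
         if iF = n - 1 then (pvUpd (tri.getD (iF - 1) []) done.length rest).foldl min m else m) := by
  intro rest
  induction rest with
  | nil =>
    intro done tri m hlt hcur
    simp only [List.length_nil, List.range'_zero, List.foldl_nil, pvUpd, List.append_nil]
    simp only [List.append_nil] at hcur
    rw [← hcur]
    rw [show tri.set iF (tri.getD iF []) = tri from by
      rw [List.getD_eq_getElem _ _ hlt]; exact List.set_getElem_self hlt]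
    split_ifs <;> rfl
  | cons v rest' ih =>
    intro done tri m hlt hcur
    rw [show (v :: rest').length = rest'.length + 1 from rfl, List.range'_succ]
    simp only [List.foldl_cons]
    have hcurget : (tri.getD iF []).getD done.length ⊤ = v := by
      rw [hcur]
      rw [List.getD_eq_getElem _ _ (by simp)]
      simp [List.getElem_append_right (le_refl done.length)]
    have hset : (tri.getD iF []).set done.length
        (v + pvPm (tri.getD (iF - 1) []) done.length)
        = done ++ (v + pvPm (tri.getD (iF - 1) []) done.length) :: rest' := by
      rw [hcur]
      simp
    have hstep : pvInner n iF (tri, m) done.length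
        = (tri.set iF (done ++ (v + pvPm (tri.getD (iF - 1) []) done.length) :: rest'),
           if iF = n - 1 then min m (v + pvPm (tri.getD (iF - 1) []) done.length) else m) := by
      simp only [pvInner, hcurget, hset]
    rw [hstep]
    set newv := v + pvPm (tri.getD (iF - 1) []) done.length with hnv
    set tri1 := tri.set iF (done ++ newv :: rest') with htri1
    have hlt1 : iF < tri1.length := by rw [htri1, List.length_set]; exact hlt
    have hcur1 : tri1.getD iF [] = (done ++ [newv]) ++ rest' := by
      rw [htri1, pvGetD_set_self _ _ _ _ hlt]
      simp
    have hprev1 : tri1.getD (iF - 1) [] = tri.getD (iF - 1) [] := by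
      rw [htri1, pvGetD_set_ne _ _ _ _ _ (by omega)]
    have := ih (done ++ [newv]) tri1 (if iF = n - 1 then min m newv else m) hlt1 hcur1
    rw [show (done ++ [newv]).length = done.length + 1 from by simp] at this
    rw [this, hprev1]
    have hsetset : tri1.set iF ((done ++ [newv]) ++ pvUpd (tri.getD (iF - 1) []) (done.length + 1) rest')
        = tri.set iF (done ++ pvUpd (tri.getD (iF - 1) []) done.length (v :: rest')) := by
      rw [htri1, List.set_set]
      simp only [pvUpd, List.append_assoc, List.singleton_append]
      rw [← hnv]
    rw [hsetset]
    congr 1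
    show (if iF = n - 1 then (pvUpd (tri.getD (iF - 1) []) (done.length + 1) rest').foldl min
            (if iF = n - 1 then min m newv else m) else (if iF = n - 1 then min m newv else m))
        = if iF = n - 1 then (pvUpd (tri.getD (iF - 1) []) done.length (v :: rest')).foldl min m else m
    split_ifs with h
    · simp only [pvUpd, List.foldl_cons]
      rw [hnv]
    · rfl

theorem pvFloor_spec (n iF : Nat) (hiF : 1 ≤ iF) (tri : List (List (WithTop Int))) (m : WithTop Int)
    (hlt : iF < tri.length) :
    pvFloor n (tri, m) iF
      = (tri.set iF (pvUpd (tri.getD (iF - 1) []) 0 (tri.getD iF [])),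
         if iF = n - 1 then (pvUpd (tri.getD (iF - 1) []) 0 (tri.getD iF [])).foldl min m else m) := by
  unfold pvFloor
  rw [List.range_eq_range']
  have := pvInner_gen n iF hiF (tri.getD iF []) [] tri m hlt (by simp)
  simpa using this

theorem pvMap_getD (rows : List (List Int)) (j : Nat) :
    (rows.map (fun r => r.map (fun (v : Int) => (v : WithTop Int)))).getD j [] = pvCoe (rows.getD j []) := by
  rcases Nat.lt_or_ge j rows.length with h | h
  · rw [List.getD_eq_getElem _ _ (by simpa using h), List.getD_eq_getElem _ _ h]
    simp [pvCoe]
  · rw [List.getD_eq_default _ _ (by simpa using h), List.getD_eq_default _ _ h]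
    rfl

theorem pvOuter_gen (n : Nat) (rows : List (List Int)) :
    ∀ (cnt i : Nat) (tri : List (List (WithTop Int))) (m : WithTop Int) (acc : List (WithTop Int)),
    1 ≤ i → i + cnt < tri.length → tri.length = rows.length → tri.length = n →
    tri.getD (i - 1) [] = acc →
    (∀ j, i ≤ j → j < tri.length → tri.getD j [] = pvCoe (rows.getD j [])) →
    ∃ tri',
      (List.range' i cnt).foldl (fun st iF => pvFloor n st iF) (tri, m) = (tri', m) ∧
      tri'.length = tri.length ∧
      tri'.getD (i + cnt - 1) [] = pvFwd acc ((rows.drop i).take cnt) ∧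
      (∀ j, i + cnt ≤ j → j < tri'.length → tri'.getD j [] = pvCoe (rows.getD j [])) := by
  intro cnt
  induction cnt with
  | zero =>
    intro i tri m acc h1 h2 h3 h4 h5 h6
    exact ⟨tri, rfl, rfl, by simpa using h5, fun j hj hjl => h6 j (by omega) hjl⟩
  | succ cnt ih =>
    intro i tri m acc h1 h2 h3 h4 h5 h6
    rw [List.range'_succ]
    simp only [List.foldl_cons]
    have hilt : i < tri.length := by omega
    have hfloor := pvFloor_spec n i h1 tri m hilt
    have hine : i ≠ n - 1 := by omega
    rw [if_neg hine] at hfloor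
    rw [hfloor, h5, h6 i (le_refl i) hilt]
    set acc1 := pvUpd acc 0 (pvCoe (rows.getD i [])) with hacc1
    set tri1 := tri.set i acc1 with htri1
    have hlen1 : tri1.length = tri.length := by rw [htri1, List.length_set]
    have hget1 : tri1.getD i [] = acc1 := by
      rw [htri1, pvGetD_set_self _ _ _ _ hilt]
    have hoth : ∀ j, i + 1 ≤ j → j < tri1.length → tri1.getD j [] = pvCoe (rows.getD j []) := by
      intro j hj1 hj2
      rw [htri1, pvGetD_set_ne _ _ _ _ _ (by omega)]
      exact h6 j (by omega) (by rw [← hlen1]; exact hj2)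
    obtain ⟨tri', heq, hl, hmid, hrest⟩ :=
      ih (i + 1) tri1 m acc1 (by omega) (by omega) (by omega) (by omega)
        (by simpa using hget1) hoth
    refine ⟨tri', heq, by omega, ?_, ?_⟩
    · have hseg : (rows.drop i).take (cnt + 1) = rows.getD i [] :: (rows.drop (i + 1)).take cnt := by
        have hirows : i < rows.length := by omega
        rw [List.drop_eq_getElem_cons hirows, List.take_succ_cons,
            List.getD_eq_getElem _ _ hirows]
      rw [hseg]
      rw [show pvFwd acc (rows.getD i [] :: (rows.drop (i + 1)).take cnt)
            = pvFwd acc1 ((rows.drop (i + 1)).take cnt) from rfl]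
      rw [show i + (cnt + 1) - 1 = i + 1 + cnt - 1 from by omega]
      exact hmid
    · intro j hj hjl
      exact hrest j (by omega) hjl

-- A's value, as pvLM of the forward DP (n ≥ 2)
theorem pvA_char (triangle : List (List Int)) (h2 : 2 ≤ triangle.length) :
    minimumTotal1 triangle
      = WithTop.untopD 0 (pvLM (pvFwd (pvCoe (triangle.getD 0 [])) (triangle.drop 1))) := by
  unfold minimumTotal1
  rw [if_neg (by omega)]
  set n := triangle.length with hn
  set tri0 : List (List (WithTop Int)) := triangle.map (fun r => r.map (fun (v : Int) => (v : WithTop Int))) with htri0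
  have hfold : (List.range (n - 1)).foldl (fun st i0 => pvFloor n st (i0 + 1)) (tri0, (⊤ : WithTop Int))
      = (List.range' 1 (n - 1)).foldl (fun st iF => pvFloor n st iF) (tri0, (⊤ : WithTop Int)) := by
    rw [List.range'_eq_map_range, List.foldl_map]
    congr 1
    funext st i
    rw [Nat.add_comm]
  rw [hfold]
  have hsplit : List.range' 1 (n - 1) = List.range' 1 (n - 2) ++ [n - 1] := by
    rw [show n - 1 = (n - 2) + 1 from by omega, List.range'_concat]
    congr 2
    omega
  rw [hsplit, List.foldl_append]
  have hlen0 : tri0.length = n := by rw [htri0]; simp [hn]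
  obtain ⟨tri', heq, hl, hmid, hrest⟩ :=
    pvOuter_gen n triangle (n - 2) 1 tri0 (⊤ : WithTop Int) (pvCoe (triangle.getD 0 []))
      (le_refl 1) (by omega) (by rw [hlen0, hn]) (by rw [hlen0])
      (by rw [show (1 : Nat) - 1 = 0 from rfl, htri0]; exact pvMap_getD triangle 0)
      (fun j _ _ => by rw [htri0]; exact pvMap_getD triangle j)
  rw [heq]
  simp only [List.foldl_cons, List.foldl_nil]
  have hl' : tri'.length = n := by omega
  have hfl := pvFloor_spec n (n - 1) (by omega) tri' (⊤ : WithTop Int) (by omega)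
  rw [if_pos rfl] at hfl
  rw [hfl]
  have hprev : tri'.getD (n - 1 - 1) []
      = pvFwd (pvCoe (triangle.getD 0 [])) ((triangle.drop 1).take (n - 2)) := by
    rw [show n - 1 - 1 = 1 + (n - 2) - 1 from by omega]
    exact hmid
  have hcur : tri'.getD (n - 1) [] = pvCoe (triangle.getD (n - 1) []) :=
    hrest (n - 1) (by omega) (by omega)
  rw [hprev, hcur]
  have hlast : (triangle.drop 1).take (n - 2) ++ [triangle.getD (n - 1) []] = triangle.drop 1 := by
    have hd : (triangle.drop 1).length = n - 1 := by simp [hn]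
    have h1 : triangle.getD (n - 1) [] = (triangle.drop 1)[n - 2]'(by omega) := by
      rw [List.getD_eq_getElem _ _ (by omega), List.getElem_drop]
      congr 1
      omega
    rw [h1, ← pvTake_succ _ _ (by omega)]
    rw [show n - 2 + 1 = n - 1 from by omega, ← hd, List.take_length]
  have hfwd : pvUpd (pvFwd (pvCoe (triangle.getD 0 [])) ((triangle.drop 1).take (n - 2))) 0
        (pvCoe (triangle.getD (n - 1) []))
      = pvFwd (pvCoe (triangle.getD 0 [])) (triangle.drop 1) := by
    conv_rhs => rw [← hlast]
    unfold pvFwd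
    rw [List.foldl_append]
    rfl
  rw [hfwd, pvFoldl_min, min_top_left]

-- ========== B-side extraction ==========

theorem pvRevFold (rows : List (List Int)) :
    ∀ (m : Nat) (d0 : List (WithTop Int)), m ≤ rows.length →
    ((List.range m).reverse).foldl (fun dp i => pvUpRow (rows.getD i []) dp) d0
      = (rows.take m).foldr pvUpRow d0 := by
  intro m
  induction m with
  | zero => intro d0 _; rfl
  | succ m ih =>
    intro d0 hm
    rw [List.range_succ, List.reverse_append, List.foldl_append]
    simp only [List.reverse_cons, List.reverse_nil, List.nil_append, List.foldl_cons, List.foldl_nil]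
    rw [ih _ (by omega)]
    have hmr : m < rows.length := by omega
    rw [pvTake_succ _ _ hmr, List.foldr_append]
    simp only [List.foldr_cons, List.foldr_nil]
    rw [List.getD_eq_getElem _ _ hmr]

theorem pvBwd_eq (rows : List (List Int)) (h : rows ≠ []) :
    (rows.take (rows.length - 1)).foldr pvUpRow (pvCoe (rows.getD (rows.length - 1) [])) = pvBwd rows := by
  induction rows with
  | nil => exact absurd rfl h
  | cons r rs ih =>
    cases rs with
    | nil => simp [pvBwd, pvCoe]
    | cons s rs' =>
      have hlen : (r :: s :: rs').length - 1 = ((s :: rs').length - 1) + 1 := by simp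
      rw [hlen, List.take_succ_cons, List.getD_cons_succ, List.foldr_cons]
      rw [ih (by simp)]
      rfl

theorem pvB_char (triangle : List (List Int)) (h2 : 2 ≤ triangle.length) :
    minimumTotal1_alt triangle = WithTop.untopD 0 (pvLM (pvBwd triangle)) := by
  unfold minimumTotal1_alt
  rw [if_neg (by omega)]
  rw [show ((triangle.getD (triangle.length - 1) []).map (fun (v : Int) => (v : WithTop Int)))
        = pvCoe (triangle.getD (triangle.length - 1) []) from rfl]
  rw [pvRevFold triangle (triangle.length - 1) _ (by omega)]
  rw [pvBwd_eq triangle (by intro hc; rw [hc] at h2; simp at h2)]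
  congr 1
  cases hb : pvBwd triangle with
  | nil => rfl
  | cons x xs =>
    show xs.foldl min x = pvLM (x :: xs)
    rw [pvFoldl_min]
    simp [pvLM]

-- the two characterisations agree
theorem pvAB (triangle : List (List Int)) (h2 : 2 ≤ triangle.length) :
    pvLM (pvFwd (pvCoe (triangle.getD 0 [])) (triangle.drop 1)) = pvLM (pvBwd triangle) := by
  have h0 : 0 < triangle.length := by omega
  have hcons : triangle = triangle.getD 0 [] :: triangle.drop 1 := by
    rw [List.getD_eq_getElem _ _ h0]
    exact (List.getElem_cons_drop h0).symm
  have hrne : triangle.drop 1 ≠ [] := by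
    intro hc
    have := congrArg List.length hc
    simp at this
    omega
  rw [pvMain (triangle.drop 1) (pvCoe (triangle.getD 0 [])) hrne]
  rw [pvKey (pvCoe (triangle.getD 0 [])) (pvBwd (triangle.drop 1))]
  conv_rhs => rw [hcons]
  cases hre : triangle.drop 1 with
  | nil => exact absurd hre hrne
  | cons s rs =>
    rw [show pvBwd (triangle.getD 0 [] :: s :: rs) = pvUpRow (triangle.getD 0 []) (pvBwd (s :: rs)) from rfl]
    rw [pvLM_pvUpRow, pvCoe_length, ← hre]
    apply pvRmin_congr
    intro k hk
    rw [pvCoe_getD _ _ hk]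

-- ===== VERDICT (by name: the statement is the Claim_ definition above) =====
theorem minimumTotal1_spec : Claim_equal_minimumTotal1 := by
  intro triangle _ hpre
  unfold Spec_minimumTotal1
  rcases Nat.lt_or_ge triangle.length 2 with h | h
  · have h1 : triangle.length = 1 := by
      rcases hpre with ⟨hne, -, -⟩
      have : triangle.length ≠ 0 := by simpa using hne
      omega
    unfold minimumTotal1 minimumTotal1_alt
    rw [if_pos h1, if_pos h1]
  · rw [pvA_char triangle h, pvB_char triangle h, pvAB triangle h]
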